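-- pv_equiv track=rewrite | github.com/RAZOR233/KORGYM | game_lib/56-black_white_copy/game_lib.py | optimize_ops
-- ===== SOURCE A (Python) =====
-- def create_board(n):
--     """生成 n*n 的初始全白棋盘，内部表示为二维列表。"""
--     return [['W' for _ in range(n)] for _ in range(n)]
--
-- def apply_operation(board, op):
--     """
--     对棋盘 board 应用一次操作 op。
--     op 为元组 (op_name, index)。
--     """
--     n = len(board)
--     op_name, idx = op
--     if op_name == "row":
--         # 将第 idx 行全部设为白色
--         for j in range(n):
--             board[idx][j] = 'W'
--     elif op_name == "line":
--         # 将第 idx 列全部设为黑色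
--         for i in range(n):
--             board[i][idx] = 'B'
--     elif op_name == "diagonal_black":
--         # 对 anti-diagonal：所有满足 i+j == idx 的格子设为黑色
--         for i in range(n):
--             for j in range(n):
--                 if i + j == idx:
--                     board[i][j] = 'B'
--     elif op_name == "diagonal_white":
--         # 对 main-diagonal（左上到右下）：所有满足 i - j == idx - (n-1) 的格子设为白色
--         target_diff = idx - (n - 1)
--         for i in range(n):
--             for j in range(n):
--                 if i - j == target_diff:
--                     board[i][j] = 'W'
--     return board
--
-- def simulate_ops(ops, n):
--     """从全白棋盘出发，模拟执行 ops 序列后得到的棋盘状态。"""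
--     board = create_board(n)
--     for op in ops:
--         board = apply_operation(board, op)
--     return board
--
-- def boards_equal(board1, board2):
--     """判断两个棋盘状态是否相同。"""
--     return all(''.join(row1) == ''.join(row2) for row1, row2 in zip(board1, board2))
--
-- def optimize_ops(ops, n):
--     """
--     贪心消除冗余操作：
--     若移除某一步后最终棋盘状态不变，则删除该步操作，直至不能再删除为止。
--     """
--     target_board = simulate_ops(ops, n)
--     i = 0
--     while i < len(ops):
--         candidate = ops[:i] + ops[i+1:]
--         if boards_equal(simulate_ops(candidate, n), target_board):
--             ops = candidate  # 移除第 i 步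
--             i = 0          # 重新从头检查
--         else:
--             i += 1
--     return ops
-- ===== SOURCE B (Python) =====
-- def optimize_ops(ops, n):
--     # Greedy redundancy elimination WITHOUT board simulation: the final color of a
--     # cell is the color of the last operation covering it (else white), so an
--     # operation is removable iff every cell where it is the LAST cover would keep
--     # its color when the previous cover (or white) shows through.  A per-cell
--     # index of covering operations replaces candidate re-simulation entirely.
--     def cells(op):
--         name, idx = op
--         if n <= 0:
--             return []
--         if name == "row":
--             r = idx % n
--             return [(r, j) for j in range(n)]
--         if name == "line":
--             c = idx % n
--             return [(i, c) for i in range(n)]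
--         if name == "diagonal_black":
--             return [(i, idx - i) for i in range(max(0, idx - (n - 1)), min(idx, n - 1) + 1)]
--         if name == "diagonal_white":
--             d = idx - (n - 1)
--             return [(i, i - d) for i in range(max(0, d), min(n - 1, n - 1 + d) + 1)]
--         return []
--
--     def color(name):
--         return 'W' if name in ("row", "diagonal_white") else 'B'
--
--     ops = list(ops)
--     while True:
--         cell_lists = [cells(op) for op in ops]
--         covers = {}
--         for k, cs in enumerate(cell_lists):
--             for c in cs:
--                 covers.setdefault(c, []).append(k)
--         removed = False
--         for k in range(len(ops)):
--             col = color(ops[k][0])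
--             ok = True
--             for c in cell_lists[k]:
--                 stack = covers[c]
--                 if stack[-1] == k:
--                     prev = color(ops[stack[-2]][0]) if len(stack) > 1 else 'W'
--                     if prev != col:
--                         ok = False
--                         break
--             if ok:
--                 del ops[k]
--                 removed = True
--                 break
--         if not removed:
--             return ops
-- ===== Notes on version B (the rewrite author's own statement) =====
-- stated objective: faster
-- what changed: B never simulates a board or builds candidate lists: it characterizes the final board as 'each cell shows the color of its last covering operation', builds a per-cell index of covering operations once per round, and declares an operation removable iff every cell where it is the last cover would keep its color under the previous cover (or white); A instead re-simulates the whole n*n board for every candidate deletion and compares boards.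
-- outside the precondition, e.g. on optimize_ops([('row', 3)], 2): A raises IndexError, B returns []
import Mathlib
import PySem

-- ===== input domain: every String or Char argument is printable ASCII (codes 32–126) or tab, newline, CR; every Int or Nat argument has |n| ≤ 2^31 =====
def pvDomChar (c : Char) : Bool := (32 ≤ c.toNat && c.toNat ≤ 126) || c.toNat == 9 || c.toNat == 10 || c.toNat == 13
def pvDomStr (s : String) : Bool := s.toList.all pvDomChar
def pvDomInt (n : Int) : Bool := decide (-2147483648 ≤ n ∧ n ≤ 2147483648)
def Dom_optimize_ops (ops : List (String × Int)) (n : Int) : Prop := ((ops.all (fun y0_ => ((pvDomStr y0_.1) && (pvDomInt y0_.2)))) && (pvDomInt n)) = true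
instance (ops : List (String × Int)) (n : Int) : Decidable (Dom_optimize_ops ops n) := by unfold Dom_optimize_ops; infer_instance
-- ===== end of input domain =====

-- B eliminates redundant operations WITHOUT simulating any board: the final color of a
-- cell is the color of its last covering operation, so a per-cell index of covering
-- operations decides removability locally; A re-simulates the whole board for every
-- candidate deletion (objective: faster).

-- ===== PORT A =====

-- Python 'board[i][j] = c': fetch row i, set cell j in it, write the row back.
-- Exact for in-range (possibly negative) i; Pre_ guarantees every executed write is in range.
def pvBoardSet (board : List (List Char)) (i j : Int) (c : Char) : List (List Char) :=
  PySem.List.pySetD board i (PySem.List.pySetD (PySem.List.pyGetD board i []) j c)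

def create_board (n : Int) : List (List Char) :=
  (PySem.List.pyRange 0 n 1).map (fun _ => (PySem.List.pyRange 0 n 1).map (fun _ => 'W'))

def apply_operation (board : List (List Char)) (op : String × Int) : List (List Char) :=
  let n : Int := board.length
  let idx := op.2
  if op.1 = "row" then
    (PySem.List.pyRange 0 n 1).foldl (fun b j => pvBoardSet b idx j 'W') board
  else if op.1 = "line" then
    (PySem.List.pyRange 0 n 1).foldl (fun b i => pvBoardSet b i idx 'B') board
  else if op.1 = "diagonal_black" then
    (PySem.List.pyRange 0 n 1).foldl (fun b i =>
      (PySem.List.pyRange 0 n 1).foldl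
        (fun b j => if i + j = idx then pvBoardSet b i j 'B' else b) b) board
  else if op.1 = "diagonal_white" then
    let target_diff := idx - (n - 1)
    (PySem.List.pyRange 0 n 1).foldl (fun b i =>
      (PySem.List.pyRange 0 n 1).foldl
        (fun b j => if i - j = target_diff then pvBoardSet b i j 'W' else b) b) board
  else board

def simulate_ops (ops : List (String × Int)) (n : Int) : List (List Char) :=
  ops.foldl apply_operation (create_board n)

-- ''.join(row) on a list of single characters is String.ofList (exact)
def boards_equal (b1 b2 : List (List Char)) : Bool :=
  (b1.zip b2).all (fun p => String.ofList p.1 == String.ofList p.2)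

-- candidate = ops[:i] + ops[i+1:] has one element fewer (for the termination argument)
theorem pvCandidate_length_lt {α : Type} (ops : List α) (i : Nat) (h : i < ops.length) :
    (PySem.List.slice ops none (some (i:Int)) ++
      PySem.List.slice ops (some ((i:Int)+1)) none).length < ops.length := by
  have h1 : PySem.List.slice ops none (some (i:Int)) = ops.take i :=
    PySem.List.slice_to_natCast ops i
  have h2 : PySem.List.slice ops (some ((i:Int)+1)) none = ops.drop (i+1) := by
    have : ((i:Int)+1) = ((i+1 : Nat) : Int) := by push_cast; ring
    rw [this, PySem.List.slice_from_natCast]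
  rw [h1, h2]
  simp [List.length_take, List.length_drop]
  omega

-- the while-loop of A's optimize_ops (state: current ops, scan position i)
def pvLoopA (n : Int) (target : List (List Char)) (ops : List (String × Int)) (i : Nat) :
    List (String × Int) :=
  if h : i < ops.length then
    let candidate := PySem.List.slice ops none (some (i:Int)) ++
      PySem.List.slice ops (some ((i:Int)+1)) none
    if boards_equal (simulate_ops candidate n) target then pvLoopA n target candidate 0
    else pvLoopA n target ops (i+1)
  else ops
termination_by (ops.length, ops.length - i)
decreasing_by
  · exact Prod.Lex.left _ _ (pvCandidate_length_lt ops i h)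
  · exact Prod.Lex.right _ (by omega)

def optimize_ops (ops : List (String × Int)) (n : Int) : List (String × Int) :=
  pvLoopA n (simulate_ops ops n) ops 0

-- ===== PORT B =====

-- Source B 'cells(op)': the list of cells operation op paints (no cells for n <= 0)
def pvCells (n : Int) (op : String × Int) : List (Int × Int) :=
  if n ≤ 0 then []
  else if op.1 = "row" then
    let r := PySem.Int.mod op.2 n
    (PySem.List.pyRange 0 n 1).map (fun j => (r, j))
  else if op.1 = "line" then
    let c := PySem.Int.mod op.2 n
    (PySem.List.pyRange 0 n 1).map (fun i => (i, c))
  else if op.1 = "diagonal_black" then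
    (PySem.List.pyRange (max 0 (op.2 - (n-1))) (min op.2 (n-1) + 1) 1).map
      (fun i => (i, op.2 - i))
  else if op.1 = "diagonal_white" then
    let d := op.2 - (n-1)
    (PySem.List.pyRange (max 0 d) (min (n-1) (n-1+d) + 1) 1).map (fun i => (i, i - d))
  else []

-- Source B 'color(name)'
def pvColor (name : String) : Char :=
  if name = "row" ∨ name = "diagonal_white" then 'W' else 'B'

-- Source B covers dict: covers.setdefault(c, []).append(k) is Dict.modify c [] (· ++ [k])
def pvCovers (cell_lists : List (List (Int × Int))) : PySem.Dict (Int × Int) (List Int) :=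
  (PySem.List.enumerate cell_lists).foldl
    (fun d p => p.2.foldl (fun d c => d.modify c [] (fun s => s ++ [p.1])) d)
    PySem.Dict.empty

-- Source B inner 'for c in cell_lists[k]' with the ok flag and break.
-- covers[c] and stack[-1]/stack[-2] are ported with defaults that are never used:
-- for every c in cs the stack contains k, so the key is present and the stack nonempty.
def pvOk (ops : List (String × Int)) (covers : PySem.Dict (Int × Int) (List Int))
    (cs : List (Int × Int)) (k : Int) (col : Char) : Bool :=
  cs.all (fun c =>
    let stack := covers.getD c []
    if PySem.List.pyGetD stack (-1) (-1) = k then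
      (if 1 < stack.length then
        pvColor (PySem.List.pyGetD ops (PySem.List.pyGetD stack (-2) 0) ("", 0)).1
       else 'W') = col
    else true)

-- Source B 'for k in range(len(ops)) … break': the first removable index
def pvFind (ops : List (String × Int)) (cell_lists : List (List (Int × Int)))
    (covers : PySem.Dict (Int × Int) (List Int)) : Option Nat :=
  (List.range ops.length).find? (fun k =>
    pvOk ops covers (cell_lists.getD k []) (k : Int)
      (pvColor (PySem.List.pyGetD ops (k : Int) ("", 0)).1))

theorem pvFind_lt (ops : List (String × Int)) (cls : List (List (Int × Int)))
    (covers : PySem.Dict (Int × Int) (List Int)) (k : Nat)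
    (h : pvFind ops cls covers = some k) : k < ops.length :=
  List.mem_range.mp (List.mem_of_find?_eq_some h)

-- Source B 'while True': remove the first removable op (del ops[k]) and start over
def pvLoopB (n : Int) (ops : List (String × Int)) : List (String × Int) :=
  let cell_lists := ops.map (pvCells n)
  let covers := pvCovers cell_lists
  match h : pvFind ops cell_lists covers with
  | some k => pvLoopB n (ops.eraseIdx k)
  | none => ops
termination_by ops.length
decreasing_by
  have hk := pvFind_lt _ _ _ _ h
  rw [List.length_eraseIdx]
  simp only [if_pos hk]
  omega

def optimize_ops_alt (ops : List (String × Int)) (n : Int) : List (String × Int) :=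
  pvLoopB n ops

-- ===== PRECONDITION & SPEC =====

-- Excludes exactly the inputs on which A raises IndexError: on a board of positive
-- size n, a "row" or "line" operation whose index is outside [-n, n) writes off the
-- board (for n ≤ 0 every loop body of A is empty, so nothing raises).
def Pre_optimize_ops (ops : List (String × Int)) (n : Int) : Prop :=
  0 < n → ∀ p ∈ ops, (p.1 = "row" ∨ p.1 = "line") → (-n ≤ p.2 ∧ p.2 < n)

instance (ops : List (String × Int)) (n : Int) : Decidable (Pre_optimize_ops ops n) := by
  unfold Pre_optimize_ops; infer_instance

def pvWitness_optimize_ops : (List (String × Int)) × Int :=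
  ([("line", 0), ("row", -1), ("diagonal_black", 1), ("diagonal_white", 0)], 2)

def Spec_optimize_ops (ops : List (String × Int)) (n : Int) (out : List (String × Int)) : Prop :=
  out = optimize_ops_alt ops n
instance (ops : List (String × Int)) (n : Int) (out : List (String × Int)) :
    Decidable (Spec_optimize_ops ops n out) := by unfold Spec_optimize_ops; infer_instance

-- ===== CLAIM (what is proved, stated in full; the proofs are below) =====
def Claim_equal_optimize_ops : Prop := ∀ (ops : List (String × Int)) (n : Int),
  Dom_optimize_ops ops n → Pre_optimize_ops ops n →
  Spec_optimize_ops ops n (optimize_ops ops n)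

-- ===== LEMMAS AND PROOFS =====

-- ---------- Python index helpers ----------

-- Python's wrapped index, as a Nat (for -len ≤ i < len)
def pvW (len : Nat) (i : Int) : Nat := (if i < 0 then i + len else i).toNat

theorem pvPyGetD_int {α : Type} (xs : List α) (i : Int) (d : α)
    (h1 : -(xs.length:Int) ≤ i) (h2 : i < xs.length) :
    PySem.List.pyGetD xs i d = xs.getD (pvW xs.length i) d := by
  simp only [PySem.List.pyGetD, PySem.List.pyGet?, PySem.List.pyIdx?, pvW]
  by_cases h0 : (0:Int) ≤ i
  · rw [if_pos h0, if_pos h2, if_neg (by omega : ¬ i < 0)]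
    simp [List.getD]
  · rw [if_neg h0, if_pos (by omega : -(xs.length:Int) ≤ i), if_pos (by omega : i < 0)]
    simp [List.getD]
    congr 2
    omega

theorem pvPySetD_int {α : Type} (xs : List α) (i : Int) (v : α)
    (h1 : -(xs.length:Int) ≤ i) (h2 : i < xs.length) :
    PySem.List.pySetD xs i v = xs.set (pvW xs.length i) v := by
  simp only [PySem.List.pySetD, PySem.List.pySet?, PySem.List.pyIdx?, pvW]
  by_cases h0 : (0:Int) ≤ i
  · rw [if_pos h0, if_pos h2, if_neg (by omega : ¬ i < 0)]
    simp
  · rw [if_neg h0, if_pos (by omega : -(xs.length:Int) ≤ i), if_pos (by omega : i < 0)]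
    simp
    congr 1
    omega

theorem pvW_lt (len : Nat) (i : Int) (h1 : -(len:Int) ≤ i) (h2 : i < len) :
    pvW len i < len := by
  unfold pvW; split <;> omega

theorem pvBoardSet_eq (b : List (List Char)) (i j : Int) (c : Char)
    (h1 : -(b.length:Int) ≤ i) (h2 : i < b.length) :
    pvBoardSet b i j c =
      b.set (pvW b.length i) (PySem.List.pySetD (b.getD (pvW b.length i) []) j c) := by
  unfold pvBoardSet
  rw [pvPyGetD_int b i [] h1 h2, pvPySetD_int _ i _ h1 h2]

-- a square board of side n
def pvSq (n : Int) (b : List (List Char)) : Prop :=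
  b.length = n.toNat ∧ ∀ r ∈ b, r.length = n.toNat

-- fold two step functions that agree on states satisfying an invariant
theorem pvFoldl_inv_congr {ι β : Type} (P : β → Prop) (l : List ι) (f g : β → ι → β)
    (b : β) (hb : P b) (hstep : ∀ b i, P b → i ∈ l → f b i = g b i)
    (hpres : ∀ b i, P b → P (g b i)) : l.foldl f b = l.foldl g b := by
  induction l generalizing b with
  | nil => rfl
  | cons x xs ih =>
    simp only [List.foldl_cons]
    rw [hstep b x hb (List.mem_cons_self)]
    exact ih (g b x) (hpres b x hb)
      (fun b i hP hi => hstep b i hP (List.mem_cons_of_mem _ hi))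

-- a guarded fold whose guard never fires is the identity
theorem pvFoldl_ite_false {β : Type} (cond : Int → Prop) [DecidablePred cond]
    (g : β → Int → β) (l : List Int) (b : β) (h : ∀ i ∈ l, ¬ cond i) :
    l.foldl (fun b i => if cond i then g b i else b) b = b := by
  induction l generalizing b with
  | nil => rfl
  | cons x xs ih =>
    simp only [List.foldl_cons, if_neg (h x (List.mem_cons_self))]
    exact ih b (fun i hi => h i (List.mem_cons_of_mem _ hi))

-- a fold that fires on exactly one element applies its step once
theorem pvFoldl_ite_single {β : Type} (t : Int) (g : β → β) (l : List Int)
    (hnd : l.Nodup) (b : β) :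
    l.foldl (fun b j => if j = t then g b else b) b = if t ∈ l then g b else b := by
  induction l generalizing b with
  | nil => simp
  | cons x xs ih =>
    rcases List.nodup_cons.mp hnd with ⟨hx, hxs⟩
    simp only [List.foldl_cons]
    by_cases hxt : x = t
    · subst hxt
      rw [if_pos rfl, if_pos (List.mem_cons_self)]
      rw [ih hxs (g b), if_neg hx]
    · rw [if_neg hxt, ih hxs b]
      simp [List.mem_cons, Ne.symm hxt]

-- filling the cells of a row one by one yields a constant row
theorem pvRowFill (c : Char) (n : Int) (k : Nat) (r : List Char)
    (hr : r.length = n.toNat) (hk : (k:Int) ≤ n) :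
    (PySem.List.pyRange (k:Int) n 1).foldl (fun r j => PySem.List.pySetD r j c) r
      = r.take k ++ List.replicate (n.toNat - k) c := by
  have hn0 : (0:Int) ≤ n := le_trans (by positivity) hk
  generalize hfu : n.toNat - k = fu
  induction fu generalizing k r with
  | zero =>
    rw [PySem.List.pyRange_one_eq_nil (by omega : n ≤ (k:Int))]
    rw [List.foldl_nil, List.take_of_length_le (by omega : r.length ≤ k)]
    simp
  | succ m ih =>
    have hkn : (k:Int) < n := by omega
    rw [PySem.List.pyRange_one_cons hkn, List.foldl_cons]
    have hset : PySem.List.pySetD r (k:Int) c = r.set k c := by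
      rw [PySem.List.pySetD_of_nonneg]
      · simp
      · positivity
    have h1 : ((k:Int)+1) = ((k+1 : Nat):Int) := by push_cast; ring
    rw [hset, h1, ih (k+1) (r.set k c) (by simp [hr]) (by omega) (by omega)]
    have hklen : k < r.length := by omega
    rw [List.set_eq_take_cons_drop c hklen]
    have hlt : (r.take k).length = k := by simp [List.length_take]; omega
    rw [List.take_append, hlt]
    have h2 : k + 1 - k = 1 := by omega
    rw [h2, List.take_of_length_le (by omega : (r.take k).length ≤ k + 1)]
    have h3 : (c :: r.drop (k+1)).take 1 = [c] := by simp
    rw [h3, List.append_assoc]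
    congr 1

-- a fold whose every step rewrites the same row acts on that row alone
theorem pvFoldSameRow (l : List Int) (k : Nat) (f : List Char → Int → List Char)
    (b : List (List Char)) (hk : k < b.length) :
    l.foldl (fun b j => b.set k (f (b.getD k []) j)) b
      = b.set k (l.foldl f (b.getD k [])) := by
  induction l generalizing b with
  | nil =>
    rw [List.foldl_nil, List.foldl_nil, List.getD_eq_getElem _ _ hk,
      List.set_getElem_self hk]
  | cons x xs ih =>
    rw [List.foldl_cons, List.foldl_cons]
    rw [ih (b.set k (f (b.getD k []) x)) (by simpa using hk)]
    rw [List.set_set]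
    congr 2
    rw [List.getD_eq_getElem _ _ (by simpa using hk),
      List.getElem_set_self (by simpa using hk)]

-- A's "row" branch replaces row idx by an all-'W' row
theorem pvApplyRow (n : Int) (hn : 0 < n) (b : List (List Char)) (hsq : pvSq n b)
    (idx : Int) (h1 : -n ≤ idx) (h2 : idx < n) :
    (PySem.List.pyRange 0 n 1).foldl (fun b j => pvBoardSet b idx j 'W') b
      = b.set (pvW n.toNat idx) (List.replicate n.toNat 'W') := by
  obtain ⟨hbl, hrows⟩ := hsq
  have hNn : ((n.toNat : Int)) = n := Int.toNat_of_nonneg (by omega)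
  have hk : pvW n.toNat idx < n.toNat := pvW_lt _ _ (by omega) (by omega)
  have hstep : ∀ (b' : List (List Char)) (j : Int), b'.length = n.toNat →
      j ∈ PySem.List.pyRange 0 n 1 →
      pvBoardSet b' idx j 'W'
        = b'.set (pvW n.toNat idx) (PySem.List.pySetD (b'.getD (pvW n.toNat idx) []) j 'W') := by
    intro b' j hlen _
    have := pvBoardSet_eq b' idx j 'W' (by rw [hlen]; omega) (by rw [hlen]; omega)
    rw [this, hlen]
  rw [pvFoldl_inv_congr (fun b' => b'.length = n.toNat) _ _ _ b hbl hstep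
      (by intro b' i h; simpa using h)]
  rw [pvFoldSameRow (PySem.List.pyRange 0 n 1) (pvW n.toNat idx)
      (fun r j => PySem.List.pySetD r j 'W') b (by omega)]
  have hrow : (b.getD (pvW n.toNat idx) []).length = n.toNat := by
    rw [List.getD_eq_getElem _ _ (by omega)]
    exact hrows _ (List.getElem_mem (by omega))
  have h0 : (0:Int) = ((0:Nat):Int) := rfl
  rw [h0, pvRowFill 'W' n 0 _ hrow (by omega)]
  simp

-- setting position i of every row, rows visited in order, is a map
theorem pvMapFold (f : List Char → List Char) (n : Int) (k : Nat)
    (b : List (List Char)) (hb : b.length = n.toNat) (hk : (k:Int) ≤ n) :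
    (PySem.List.pyRange (k:Int) n 1).foldl
        (fun b i => b.set i.toNat (f (b.getD i.toNat []))) b
      = b.take k ++ (b.drop k).map f := by
  have hn0 : (0:Int) ≤ n := le_trans (by positivity) hk
  generalize hfu : n.toNat - k = fu
  induction fu generalizing k b with
  | zero =>
    rw [PySem.List.pyRange_one_eq_nil (by omega : n ≤ (k:Int))]
    rw [List.foldl_nil, List.take_of_length_le (by omega : b.length ≤ k),
      List.drop_of_length_le (by omega : b.length ≤ k)]
    simp
  | succ m ih =>
    have hkn : (k:Int) < n := by omega
    have hkb : k < b.length := by omega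
    rw [PySem.List.pyRange_one_cons hkn, List.foldl_cons]
    have h1 : ((k:Int)+1) = ((k+1 : Nat):Int) := by push_cast; ring
    have hknat : ((k:Int)).toNat = k := by omega
    rw [hknat, h1,
      ih (k+1) (b.set k (f (b.getD k []))) (by simpa using hb) (by omega) (by omega)]
    rw [List.getD_eq_getElem _ _ hkb]
    rw [List.drop_set_of_lt (by omega : k < k + 1)]
    rw [List.set_eq_take_cons_drop _ hkb]
    have hlt : (b.take k).length = k := by simp [List.length_take]; omega
    rw [List.take_append, hlt, List.take_of_length_le (by omega : (b.take k).length ≤ k + 1)]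
    have h2 : k + 1 - k = 1 := by omega
    rw [h2]
    have h3 : (f b[k] :: b.drop (k+1)).take 1 = [f b[k]] := by simp
    rw [h3, List.append_assoc]
    congr 1
    rw [List.drop_eq_getElem_cons hkb, List.map_cons]
    rfl

-- A's "line" branch maps every row
theorem pvApplyLine (n : Int) (hn : 0 < n) (b : List (List Char)) (hsq : pvSq n b)
    (idx : Int) :
    (PySem.List.pyRange 0 n 1).foldl (fun b i => pvBoardSet b i idx 'B') b
      = b.map (fun row => PySem.List.pySetD row idx 'B') := by
  obtain ⟨hbl, hrows⟩ := hsq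
  have hstep : ∀ (b' : List (List Char)) (i : Int), b'.length = n.toNat →
      i ∈ PySem.List.pyRange 0 n 1 →
      pvBoardSet b' i idx 'B'
        = b'.set i.toNat (PySem.List.pySetD (b'.getD i.toNat []) idx 'B') := by
    intro b' i hlen hmem
    rw [PySem.List.mem_pyRange_one] at hmem
    have hr := pvBoardSet_eq b' i idx 'B' (by rw [hlen]; omega) (by rw [hlen]; omega)
    rw [hr]
    have : pvW b'.length i = i.toNat := by unfold pvW; rw [if_neg (by omega : ¬ i < 0)]
    rw [this]
  rw [pvFoldl_inv_congr (fun b' => b'.length = n.toNat) _ _ _ b hbl hstep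
      (by intro b' i h; simpa using h)]
  have h0 : (0:Int) = ((0:Nat):Int) := rfl
  rw [h0, pvMapFold (fun row => PySem.List.pySetD row idx 'B') n 0 b hbl (by omega)]
  simp

-- a guarded fold over [0,n) equals the unguarded fold over the sub-range where the guard holds
theorem pvFoldRestrict {β : Type} (n lo hi : Int) (cond : Int → Prop) [DecidablePred cond]
    (S : β → Int → β) (b : β) (hlo : 0 ≤ lo) (hhi : hi < n)
    (hiff : ∀ i, 0 ≤ i → i < n → (cond i ↔ (lo ≤ i ∧ i ≤ hi))) :
    (PySem.List.pyRange 0 n 1).foldl (fun b i => if cond i then S b i else b) b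
      = (PySem.List.pyRange lo (hi+1) 1).foldl S b := by
  by_cases hle : lo ≤ hi
  · rw [PySem.List.pyRange_one_append 0 lo n hlo (by omega)]
    rw [PySem.List.pyRange_one_append lo (hi+1) n (by omega) (by omega)]
    rw [List.foldl_append, List.foldl_append]
    rw [pvFoldl_ite_false cond S _ b (by
      intro i hi'
      rw [PySem.List.mem_pyRange_one] at hi'
      intro hc
      have := (hiff i (by omega) (by omega)).mp hc
      omega)]
    rw [PySem.List.foldl_congr_mem _ (fun b i => if cond i then S b i else b) S b (by
      intro acc i hi'
      rw [PySem.List.mem_pyRange_one] at hi'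
      simp only []
      rw [if_pos ((hiff i (by omega) (by omega)).mpr (by omega))])]
    rw [pvFoldl_ite_false cond S _ _ (by
      intro i hi'
      rw [PySem.List.mem_pyRange_one] at hi'
      intro hc
      have := (hiff i (by omega) (by omega)).mp hc
      omega)]
  · rw [PySem.List.pyRange_one_eq_nil (by omega : hi + 1 ≤ lo), List.foldl_nil]
    exact pvFoldl_ite_false cond S _ b (by
      intro i hi'
      rw [PySem.List.mem_pyRange_one] at hi'
      intro hc
      have := (hiff i (by omega) (by omega)).mp hc
      omega)

-- a fold that can fire on at most the single index t of [0,n)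
theorem pvSingleRange {β : Type} (g : β → β) (t n : Int) (b : β) :
    (PySem.List.pyRange 0 n 1).foldl (fun b j => if j = t then g b else b) b
      = if 0 ≤ t ∧ t < n then g b else b := by
  rw [pvFoldl_ite_single t g _ (PySem.List.nodup_pyRange_one 0 n) b]
  simp [PySem.List.mem_pyRange_one]

-- A's string comparison of same-length boards is board equality
theorem pvBoardsEqual_iff (b1 b2 : List (List Char)) (h : b1.length = b2.length) :
    boards_equal b1 b2 = true ↔ b1 = b2 := by
  unfold boards_equal
  induction b1 generalizing b2 with
  | nil => cases b2 with
    | nil => simp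
    | cons r t => simp at h
  | cons r1 t1 ih =>
    cases b2 with
    | nil => simp at h
    | cons r2 t2 =>
      simp only [List.zip_cons_cons, List.all_cons, Bool.and_eq_true, beq_iff_eq]
      rw [ih t2 (by simpa using h)]
      constructor
      · rintro ⟨he, ht⟩
        have hr : r1 = r2 := by
          have := congrArg String.toList he
          simpa using this
        rw [hr, ht]
      · intro heq
        injection heq with h1 h2
        exact ⟨by rw [h1], h2⟩

-- A's step on the empty board is the empty board
theorem pvApplyNil (op : String × Int) : apply_operation [] op = [] := by
  unfold apply_operation
  have h : PySem.List.pyRange 0 ((List.length ([] : List (List Char)) : Int)) 1 = [] := by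
    rw [PySem.List.pyRange_one_eq_nil (by simp)]
  simp only [h, List.foldl_nil]
  split_ifs <;> rfl

theorem pvSim_nonpos (ops : List (String × Int)) (n : Int) (hn : n ≤ 0) :
    simulate_ops ops n = [] := by
  unfold simulate_ops
  have hcb : create_board n = [] := by
    unfold create_board
    rw [PySem.List.pyRange_one_eq_nil hn]
    rfl
  rw [hcb]
  induction ops with
  | nil => rfl
  | cons x xs ih => rw [List.foldl_cons, pvApplyNil]; exact ih

-- ---------- mapform boards ----------

def pvMapform (n : Int) (g : Int → Int → Char) : List (List Char) :=
  (PySem.List.pyRange 0 n 1).map (fun i => (PySem.List.pyRange 0 n 1).map (fun j => g i j))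

theorem pvMapform_congr (n : Int) (g1 g2 : Int → Int → Char)
    (h : ∀ i j, 0 ≤ i → i < n → 0 ≤ j → j < n → g1 i j = g2 i j) :
    pvMapform n g1 = pvMapform n g2 := by
  unfold pvMapform
  apply List.map_congr_left
  intro i hi
  rw [PySem.List.mem_pyRange_one] at hi
  apply List.map_congr_left
  intro j hj
  rw [PySem.List.mem_pyRange_one] at hj
  exact h i j hi.1 hi.2 hj.1 hj.2

theorem pvMapform_length (n : Int) (g : Int → Int → Char) :
    (pvMapform n g).length = n.toNat := by
  simp [pvMapform, PySem.List.length_pyRange_one]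

theorem pvMapform_getElem (n : Int) (g : Int → Int → Char) (p : Nat)
    (hp : p < (pvMapform n g).length) :
    (pvMapform n g)[p] = (PySem.List.pyRange 0 n 1).map (fun j => g (p:Int) j) := by
  unfold pvMapform at hp ⊢
  rw [List.getElem_map]
  congr 1
  have hp' : p < (PySem.List.pyRange 0 n 1).length := by
    simpa [List.length_map] using hp
  rw [PySem.List.getElem_pyRange_one]
  simp

theorem pvMapform_sq (n : Int) (g : Int → Int → Char) : pvSq n (pvMapform n g) := by
  refine ⟨pvMapform_length n g, ?_⟩
  intro r hr
  unfold pvMapform at hr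
  rcases List.mem_map.mp hr with ⟨i, _, rfl⟩
  simp [PySem.List.length_pyRange_one]

theorem pvMapform_eq_iff (n : Int) (g1 g2 : Int → Int → Char) :
    pvMapform n g1 = pvMapform n g2 ↔
      ∀ i j, 0 ≤ i → i < n → 0 ≤ j → j < n → g1 i j = g2 i j := by
  constructor
  · intro h i j hi0 hin hj0 hjn
    have hp1 : i.toNat < (pvMapform n g1).length := by rw [pvMapform_length]; omega
    have hp2 : i.toNat < (pvMapform n g2).length := by rw [pvMapform_length]; omega
    have hrow : (pvMapform n g1)[i.toNat]'hp1 = (pvMapform n g2)[i.toNat]'hp2 := by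
      simp only [h]
    rw [pvMapform_getElem n g1 i.toNat hp1, pvMapform_getElem n g2 i.toNat hp2] at hrow
    have hq : j.toNat < (PySem.List.pyRange 0 n 1).length := by
      rw [PySem.List.length_pyRange_one]; omega
    have hq1 : j.toNat < ((PySem.List.pyRange 0 n 1).map
        (fun jj => g1 (i.toNat : Int) jj)).length := by simpa [List.length_map] using hq
    have hq2 : j.toNat < ((PySem.List.pyRange 0 n 1).map
        (fun jj => g2 (i.toNat : Int) jj)).length := by simpa [List.length_map] using hq
    have hcell : ((PySem.List.pyRange 0 n 1).map
        (fun jj => g1 (i.toNat : Int) jj))[j.toNat]'hq1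
        = ((PySem.List.pyRange 0 n 1).map (fun jj => g2 (i.toNat : Int) jj))[j.toNat]'hq2 := by
      simp only [hrow]
    rw [List.getElem_map, List.getElem_map, PySem.List.getElem_pyRange_one] at hcell
    have hi' : ((i.toNat : Nat) : Int) = i := by omega
    have hj' : (0 + ((j.toNat : Nat) : Int)) = j := by omega
    rwa [hi', hj'] at hcell
  · exact pvMapform_congr n g1 g2

-- cell update on a mapform board
theorem pvMapform_cellSet (n : Int) (g : Int → Int → Char) (i0 j0 : Int) (c : Char)
    (hi0 : 0 ≤ i0) (hin : i0 < n) (hj0 : 0 ≤ j0) (hjn : j0 < n) :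
    pvBoardSet (pvMapform n g) i0 j0 c
      = pvMapform n (fun i j => if i = i0 ∧ j = j0 then c else g i j) := by
  have hlen : ((pvMapform n g).length : Int) = n := by rw [pvMapform_length]; omega
  rw [pvBoardSet_eq _ _ _ _ (by omega) (by omega)]
  have hw : pvW (pvMapform n g).length i0 = i0.toNat := by
    unfold pvW; rw [if_neg (by omega : ¬ i0 < 0)]
  rw [hw]
  have hget : (pvMapform n g).getD i0.toNat []
      = (PySem.List.pyRange 0 n 1).map (fun j => g (i0.toNat : Int) j) := by
    rw [List.getD_eq_getElem _ _ (by rw [pvMapform_length]; omega)]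
    exact pvMapform_getElem n g i0.toNat (by rw [pvMapform_length]; omega)
  rw [hget]
  have hrl : ((PySem.List.pyRange 0 n 1).map (fun j => g (i0.toNat : Int) j)).length
      = n.toNat := by simp [PySem.List.length_pyRange_one]
  rw [pvPySetD_int _ j0 c (by rw [hrl]; omega) (by rw [hrl]; omega)]
  have hwj : pvW ((PySem.List.pyRange 0 n 1).map
      (fun j => g (i0.toNat : Int) j)).length j0 = j0.toNat := by
    unfold pvW; rw [if_neg (by omega : ¬ j0 < 0)]
  rw [hwj]
  apply List.ext_getElem
  · simp [pvMapform_length]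
  · intro p hp1 hp2
    have hpn : p < (pvMapform n g).length := by simpa using hp1
    by_cases hpi : p = i0.toNat
    · subst hpi
      rw [List.getElem_set_self (by simpa using hpn)]
      rw [pvMapform_getElem _ _ _ hp2]
      apply List.ext_getElem
      · simp [PySem.List.length_pyRange_one]
      · intro q hq1 hq2
        have hqr : q < (PySem.List.pyRange 0 n 1).length := by
          simpa [List.length_map] using hq2
        by_cases hqj : q = j0.toNat
        · subst hqj
          rw [List.getElem_set_self (by simpa [List.length_map] using hqr)]
          rw [List.getElem_map, PySem.List.getElem_pyRange_one]
          rw [if_pos (show (((i0.toNat:Nat):Int)) = i0 ∧ (0 + ((j0.toNat:Nat):Int)) = j0 from ⟨by omega, by omega⟩)]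
        · rw [List.getElem_set_ne (by omega)]
          rw [List.getElem_map, List.getElem_map, PySem.List.getElem_pyRange_one]
          rw [if_neg (by intro hand; omega)]
    · rw [List.getElem_set_ne (by omega)]
      rw [pvMapform_getElem _ _ _ hpn, pvMapform_getElem _ _ _ hp2]
      apply List.map_congr_left
      intro j hj
      rw [PySem.List.mem_pyRange_one] at hj
      rw [if_neg (by intro hand; omega)]

-- replacing row w of a mapform board by a constant row
theorem pvMapform_setRow (n : Int) (g : Int → Int → Char) (w : Int) (c : Char)
    (hw0 : 0 ≤ w) (hwn : w < n) :
    (pvMapform n g).set w.toNat (List.replicate n.toNat c)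
      = pvMapform n (fun i j => if i = w then c else g i j) := by
  apply List.ext_getElem
  · simp [pvMapform_length]
  · intro p hp1 hp2
    have hpn : p < (pvMapform n g).length := by simpa using hp1
    by_cases hpw : p = w.toNat
    · subst hpw
      rw [List.getElem_set_self (by simpa using hpn)]
      rw [pvMapform_getElem _ _ _ hp2]
      apply List.ext_getElem
      · simp [PySem.List.length_pyRange_one]
      · intro q hq1 hq2
        rw [List.getElem_replicate, List.getElem_map]
        rw [if_pos (show ((w.toNat : Nat) : Int) = w by omega)]
    · rw [List.getElem_set_ne (by omega)]
      rw [pvMapform_getElem _ _ _ hpn, pvMapform_getElem _ _ _ hp2]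
      apply List.map_congr_left
      intro j hj
      have hplt : p < n.toNat := by simpa [pvMapform_length] using hpn
      rw [if_neg (by intro hip; omega)]

-- writing column w of every row of a mapform board
theorem pvMapform_setCol (n : Int) (g : Int → Int → Char) (idx : Int) (c : Char)
    (hn : 0 < n) (h1 : -n ≤ idx) (h2 : idx < n) :
    (pvMapform n g).map (fun row => PySem.List.pySetD row idx c)
      = pvMapform n (fun i j => if j = ((pvW n.toNat idx : Nat) : Int) then c else g i j) := by
  unfold pvMapform
  rw [List.map_map]
  apply List.map_congr_left
  intro i hi
  simp only [Function.comp]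
  have hrl : ((PySem.List.pyRange 0 n 1).map (fun j => g i j)).length = n.toNat := by
    simp [PySem.List.length_pyRange_one]
  rw [pvPySetD_int _ idx c (by rw [hrl]; omega) (by rw [hrl]; omega)]
  rw [hrl]
  apply List.ext_getElem
  · simp [PySem.List.length_pyRange_one]
  · intro q hq1 hq2
    have hqr : q < (PySem.List.pyRange 0 n 1).length := by
      simpa [List.length_map] using hq2
    have hwlt : pvW n.toNat idx < n.toNat := pvW_lt n.toNat idx (by omega) (by omega)
    by_cases hqw : q = pvW n.toNat idx
    · subst hqw
      rw [List.getElem_set_self (by simpa [List.length_map] using hqr)]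
      rw [List.getElem_map, PySem.List.getElem_pyRange_one]
      rw [if_pos (by omega)]
    · rw [List.getElem_set_ne (by omega)]
      rw [List.getElem_map, List.getElem_map, PySem.List.getElem_pyRange_one]
      rw [if_neg (by intro hq; omega)]

-- a diagonal fold (one cell per visited index) on a mapform board
theorem pvFoldDiag (n : Int) (f : Int → Int) (col : Char) (l : List Int)
    (hl : ∀ i ∈ l, 0 ≤ i ∧ i < n ∧ 0 ≤ f i ∧ f i < n) (g : Int → Int → Char) :
    l.foldl (fun b i => pvBoardSet b i (f i) col) (pvMapform n g)
      = pvMapform n (fun i j => if i ∈ l ∧ j = f i then col else g i j) := by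
  induction l generalizing g with
  | nil => exact (pvMapform_congr n _ _ (by intro i j _ _ _ _; simp)).symm
  | cons x xs ih =>
    rw [List.foldl_cons]
    obtain ⟨hx0, hxn, hf0, hfn⟩ := hl x (List.mem_cons_self)
    rw [pvMapform_cellSet n g x (f x) col hx0 hxn hf0 hfn]
    rw [ih (fun i hi => hl i (List.mem_cons_of_mem _ hi))]
    apply pvMapform_congr
    intro i j hi0 hin hj0 hjn
    by_cases hcase : i ∈ xs ∧ j = f i
    · rw [if_pos hcase, if_pos ⟨List.mem_cons_of_mem _ hcase.1, hcase.2⟩]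
    · rw [if_neg hcase]
      by_cases h2 : i = x ∧ j = f x
      · rw [if_pos h2,
          if_pos (show i ∈ x :: xs ∧ j = f i from
            ⟨by rw [h2.1]; exact List.mem_cons_self, by rw [h2.1]; exact h2.2⟩)]
      · have hnc : ¬ (i ∈ x :: xs ∧ j = f i) := by
          intro ⟨hm, hj⟩
          rcases List.mem_cons.mp hm with rfl | hm'
          · exact h2 ⟨rfl, hj⟩
          · exact hcase ⟨hm', hj⟩
        rw [if_neg hnc, if_neg h2]

-- ---------- membership in the four cell lists ----------

theorem pvMem_cells_row (n : Int) (op : String × Int) (hn : 0 < n) (h : op.1 = "row")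
    (i j : Int) :
    ((i, j) ∈ pvCells n op) ↔ (i = PySem.Int.mod op.2 n ∧ 0 ≤ j ∧ j < n) := by
  simp only [pvCells, if_neg (by omega : ¬ n ≤ 0), if_pos h]
  simp only [List.mem_map, PySem.List.mem_pyRange_one, Prod.mk.injEq]
  constructor
  · rintro ⟨j', hj', rfl, rfl⟩; exact ⟨rfl, by omega, by omega⟩
  · rintro ⟨rfl, hj0, hjn⟩; exact ⟨j, ⟨by omega, by omega⟩, rfl, rfl⟩

theorem pvMem_cells_line (n : Int) (op : String × Int) (hn : 0 < n)
    (h1 : ¬ op.1 = "row") (h : op.1 = "line") (i j : Int) :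
    ((i, j) ∈ pvCells n op) ↔ (j = PySem.Int.mod op.2 n ∧ 0 ≤ i ∧ i < n) := by
  simp only [pvCells, if_neg (by omega : ¬ n ≤ 0), if_neg h1, if_pos h]
  simp only [List.mem_map, PySem.List.mem_pyRange_one, Prod.mk.injEq]
  constructor
  · rintro ⟨i', hi', rfl, rfl⟩; exact ⟨rfl, by omega, by omega⟩
  · rintro ⟨rfl, hi0, hin⟩; exact ⟨i, ⟨by omega, by omega⟩, rfl, rfl⟩

theorem pvMem_cells_db (n : Int) (op : String × Int) (hn : 0 < n)
    (h1 : ¬ op.1 = "row") (h2 : ¬ op.1 = "line") (h : op.1 = "diagonal_black") (i j : Int) :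
    ((i, j) ∈ pvCells n op) ↔
      (max 0 (op.2 - (n-1)) ≤ i ∧ i ≤ min op.2 (n-1) ∧ j = op.2 - i) := by
  simp only [pvCells, if_neg (by omega : ¬ n ≤ 0), if_neg h1, if_neg h2, if_pos h]
  simp only [List.mem_map, PySem.List.mem_pyRange_one, Prod.mk.injEq]
  constructor
  · rintro ⟨i', hi', rfl, rfl⟩; exact ⟨hi'.1, by omega, rfl⟩
  · rintro ⟨hlo, hhi, rfl⟩; exact ⟨i, ⟨hlo, by omega⟩, rfl, rfl⟩

theorem pvMem_cells_dw (n : Int) (op : String × Int) (hn : 0 < n)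
    (h1 : ¬ op.1 = "row") (h2 : ¬ op.1 = "line") (h3 : ¬ op.1 = "diagonal_black")
    (h : op.1 = "diagonal_white") (i j : Int) :
    ((i, j) ∈ pvCells n op) ↔
      (max 0 (op.2 - (n-1)) ≤ i ∧ i ≤ min (n-1) (n - 1 + (op.2 - (n-1))) ∧
        j = i - (op.2 - (n-1))) := by
  simp only [pvCells, if_neg (by omega : ¬ n ≤ 0), if_neg h1, if_neg h2, if_neg h3, if_pos h]
  simp only [List.mem_map, PySem.List.mem_pyRange_one, Prod.mk.injEq]
  constructor
  · rintro ⟨i', hi', rfl, rfl⟩; exact ⟨hi'.1, by omega, rfl⟩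
  · rintro ⟨hlo, hhi, rfl⟩; exact ⟨i, ⟨hlo, by omega⟩, rfl, rfl⟩

theorem pvCells_other (n : Int) (op : String × Int)
    (h1 : ¬ op.1 = "row") (h2 : ¬ op.1 = "line") (h3 : ¬ op.1 = "diagonal_black")
    (h4 : ¬ op.1 = "diagonal_white") : pvCells n op = [] := by
  by_cases hn : n ≤ 0 <;> simp [pvCells, hn, h1, h2, h3, h4]

theorem pvCells_nonpos (n : Int) (op : String × Int) (hn : n ≤ 0) : pvCells n op = [] := by
  simp [pvCells, hn]

theorem pvCells_in_grid (n : Int) (op : String × Int) (i j : Int)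
    (h : (i, j) ∈ pvCells n op) : 0 ≤ i ∧ i < n ∧ 0 ≤ j ∧ j < n := by
  by_cases hn : n ≤ 0
  · rw [pvCells_nonpos n op hn] at h; simp at h
  · have hn' : 0 < n := by omega
    have hm1 := PySem.Int.mod_nonneg op.2 hn'
    have hm2 := PySem.Int.mod_lt op.2 hn'
    by_cases h1 : op.1 = "row"
    · rw [pvMem_cells_row n op hn' h1] at h; omega
    · by_cases h2 : op.1 = "line"
      · rw [pvMem_cells_line n op hn' h1 h2] at h; omega
      · by_cases h3 : op.1 = "diagonal_black"
        · rw [pvMem_cells_db n op hn' h1 h2 h3] at h; omega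
        · by_cases h4 : op.1 = "diagonal_white"
          · rw [pvMem_cells_dw n op hn' h1 h2 h3 h4] at h; omega
          · rw [pvCells_other n op h1 h2 h3 h4] at h; simp at h

theorem pvCells_nodup (n : Int) (op : String × Int) : (pvCells n op).Nodup := by
  unfold pvCells
  split_ifs <;>
    first
      | exact List.nodup_nil
      | exact List.Nodup.map (fun a b hab => by
          simpa using congrArg Prod.snd hab) (PySem.List.nodup_pyRange_one _ _)
      | exact List.Nodup.map (fun a b hab => by
          simpa using congrArg Prod.fst hab) (PySem.List.nodup_pyRange_one _ _)

-- wrapped Python index = Python mod, for -n ≤ idx < n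
theorem pvW_eq_mod (n idx : Int) (hn : 0 < n) (h1 : -n ≤ idx) (h2 : idx < n) :
    ((pvW n.toNat idx : Nat) : Int) = PySem.Int.mod idx n := by
  rw [PySem.Int.mod_eq_emod_of_pos hn]
  unfold pvW
  by_cases hneg : idx < 0
  · rw [if_pos hneg]
    have h3 : idx % n = (idx + n) % n := (Int.add_emod_right idx n).symm
    rw [h3, Int.emod_eq_of_lt (by omega) (by omega)]
    omega
  · rw [if_neg hneg, Int.emod_eq_of_lt (by omega) (by omega)]
    omega

-- ---------- apply_operation acts cellwise on a mapform board ----------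

theorem pvApply_mapform (n : Int) (hn : 0 < n) (g : Int → Int → Char) (op : String × Int)
    (hgood : (op.1 = "row" ∨ op.1 = "line") → (-n ≤ op.2 ∧ op.2 < n)) :
    apply_operation (pvMapform n g) op
      = pvMapform n (fun i j => if (i, j) ∈ pvCells n op then pvColor op.1 else g i j) := by
  have hblen : ((pvMapform n g).length : Int) = n := by rw [pvMapform_length]; omega
  simp only [apply_operation, hblen]
  split_ifs with h1 h2 h3 h4
  · -- row
    have hg := hgood (Or.inl h1)
    rw [pvApplyRow n hn _ (pvMapform_sq n g) op.2 hg.1 hg.2]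
    have hwlt := pvW_lt n.toNat op.2 (by omega) (by omega)
    have hwcast : pvW n.toNat op.2 = (((pvW n.toNat op.2 : Nat) : Int)).toNat := by simp
    rw [hwcast, pvMapform_setRow n g _ 'W' (by positivity) (by omega)]
    have hmod := pvW_eq_mod n op.2 hn hg.1 hg.2
    have hcol : pvColor op.1 = 'W' := by simp [pvColor, h1]
    apply pvMapform_congr
    intro i j hi0 hin hj0 hjn
    by_cases hiw : i = PySem.Int.mod op.2 n
    · rw [if_pos (by omega),
        if_pos ((pvMem_cells_row n op hn h1 i j).mpr ⟨hiw, hj0, hjn⟩), hcol]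
    · rw [if_neg (by omega),
        if_neg (fun hmem => hiw ((pvMem_cells_row n op hn h1 i j).mp hmem).1)]
  · -- line
    have hg := hgood (Or.inr h2)
    rw [pvApplyLine n hn _ (pvMapform_sq n g) op.2]
    rw [pvMapform_setCol n g op.2 'B' hn hg.1 hg.2]
    have hmod := pvW_eq_mod n op.2 hn hg.1 hg.2
    have hcol : pvColor op.1 = 'B' := by simp [pvColor, h2]
    apply pvMapform_congr
    intro i j hi0 hin hj0 hjn
    by_cases hjw : j = PySem.Int.mod op.2 n
    · rw [if_pos (by omega),
        if_pos ((pvMem_cells_line n op hn h1 h2 i j).mpr ⟨hjw, hi0, hin⟩), hcol]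
    · rw [if_neg (by omega),
        if_neg (fun hmem => hjw ((pvMem_cells_line n op hn h1 h2 i j).mp hmem).1)]
  · -- diagonal_black
    have hfun : (fun (b : List (List Char)) (i : Int) =>
        (PySem.List.pyRange 0 n 1).foldl
          (fun b j => if i + j = op.2 then pvBoardSet b i j 'B' else b) b)
      = (fun b i => if 0 ≤ op.2 - i ∧ op.2 - i < n then
          pvBoardSet b i (op.2 - i) 'B' else b) := by
      funext b' i
      have hl : (fun (bb : List (List Char)) (j : Int) =>
            if i + j = op.2 then pvBoardSet bb i j 'B' else bb)
          = (fun bb j => if j = op.2 - i then pvBoardSet bb i (op.2 - i) 'B' else bb) := by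
        funext bb j
        by_cases hj : j = op.2 - i
        · rw [if_pos (by omega), if_pos hj, hj]
        · rw [if_neg (by omega), if_neg hj]
      rw [hl]
      exact pvSingleRange (fun bb => pvBoardSet bb i (op.2 - i) 'B') (op.2 - i) n b'
    rw [hfun]
    rw [pvFoldRestrict n (max 0 (op.2 - (n-1))) (min op.2 (n-1))
      (fun i => 0 ≤ op.2 - i ∧ op.2 - i < n)
      (fun b i => pvBoardSet b i (op.2 - i) 'B') _
      (by omega) (by omega) (by intro i hi0 hin; constructor <;> (intro; omega))]
    rw [pvFoldDiag n (fun i => op.2 - i) 'B' _ (by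
      intro i hi
      rw [PySem.List.mem_pyRange_one] at hi
      refine ⟨?_, ?_, ?_, ?_⟩ <;> (beta_reduce; omega)) g]
    have hcol : pvColor op.1 = 'B' := by simp [pvColor, h3]
    apply pvMapform_congr
    intro i j hi0 hin hj0 hjn
    by_cases hmem : i ∈ PySem.List.pyRange (max 0 (op.2 - (n-1))) (min op.2 (n-1) + 1) 1
        ∧ j = op.2 - i
    · have hmem' := hmem
      rw [PySem.List.mem_pyRange_one] at hmem'
      rw [if_pos hmem,
        if_pos ((pvMem_cells_db n op hn h1 h2 h3 i j).mpr
          ⟨by omega, by omega, hmem.2⟩), hcol]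
    · rw [if_neg hmem, if_neg (fun hc => by
        have := (pvMem_cells_db n op hn h1 h2 h3 i j).mp hc
        exact hmem ⟨by rw [PySem.List.mem_pyRange_one]; omega, this.2.2⟩)]
  · -- diagonal_white
    have hfun : (fun (b : List (List Char)) (i : Int) =>
        (PySem.List.pyRange 0 n 1).foldl
          (fun b j => if i - j = op.2 - (n - 1) then pvBoardSet b i j 'W' else b) b)
      = (fun b i => if 0 ≤ i - (op.2 - (n - 1)) ∧ i - (op.2 - (n - 1)) < n then
          pvBoardSet b i (i - (op.2 - (n - 1))) 'W' else b) := by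
      funext b' i
      have hl : (fun (bb : List (List Char)) (j : Int) =>
            if i - j = op.2 - (n - 1) then pvBoardSet bb i j 'W' else bb)
          = (fun bb j => if j = i - (op.2 - (n - 1)) then
              pvBoardSet bb i (i - (op.2 - (n - 1))) 'W' else bb) := by
        funext bb j
        by_cases hj : j = i - (op.2 - (n - 1))
        · rw [if_pos (by omega), if_pos hj, hj]
        · rw [if_neg (by omega), if_neg hj]
      rw [hl]
      exact pvSingleRange (fun bb => pvBoardSet bb i (i - (op.2 - (n - 1))) 'W')
        (i - (op.2 - (n - 1))) n b'
    rw [hfun]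
    rw [pvFoldRestrict n (max 0 (op.2 - (n-1))) (min (n-1) (n - 1 + (op.2 - (n-1))))
      (fun i => 0 ≤ i - (op.2 - (n - 1)) ∧ i - (op.2 - (n - 1)) < n)
      (fun b i => pvBoardSet b i (i - (op.2 - (n - 1))) 'W') _
      (by omega) (by omega) (by intro i hi0 hin; constructor <;> (intro; omega))]
    rw [pvFoldDiag n (fun i => i - (op.2 - (n - 1))) 'W' _ (by
      intro i hi
      rw [PySem.List.mem_pyRange_one] at hi
      refine ⟨?_, ?_, ?_, ?_⟩ <;> (beta_reduce; omega)) g]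
    have hcol : pvColor op.1 = 'W' := by simp [pvColor, h4]
    apply pvMapform_congr
    intro i j hi0 hin hj0 hjn
    by_cases hmem : i ∈ PySem.List.pyRange (max 0 (op.2 - (n-1)))
        (min (n-1) (n - 1 + (op.2 - (n-1))) + 1) 1 ∧ j = i - (op.2 - (n - 1))
    · have hmem' := hmem
      rw [PySem.List.mem_pyRange_one] at hmem'
      rw [if_pos hmem,
        if_pos ((pvMem_cells_dw n op hn h1 h2 h3 h4 i j).mpr
          ⟨by omega, by omega, hmem.2⟩), hcol]
    · rw [if_neg hmem, if_neg (fun hc => by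
        have := (pvMem_cells_dw n op hn h1 h2 h3 h4 i j).mp hc
        exact hmem ⟨by rw [PySem.List.mem_pyRange_one]; omega, this.2.2⟩)]
  · -- unknown op name: no cells
    rw [pvCells_other n op h1 h2 h3 h4]
    exact (pvMapform_congr n _ _ (by intro i j _ _ _ _; simp)).symm

-- ---------- the final color of a cell ----------

def pvFinal (n : Int) (l : List (String × Int)) (c : Int × Int) : Char :=
  l.foldl (fun a op => if c ∈ pvCells n op then pvColor op.1 else a) 'W'

def pvBoardOf (n : Int) (l : List (String × Int)) : List (List Char) :=
  pvMapform n (fun i j => pvFinal n l (i, j))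

-- the simulation characterization: every cell shows the color of its last cover
theorem pvSimChar (n : Int) (hn : 0 < n) (ops : List (String × Int))
    (hPre : ∀ p ∈ ops, (p.1 = "row" ∨ p.1 = "line") → (-n ≤ p.2 ∧ p.2 < n)) :
    simulate_ops ops n = pvBoardOf n ops := by
  induction ops using List.reverseRecOn with
  | nil =>
    unfold simulate_ops pvBoardOf create_board pvMapform
    rw [List.foldl_nil]
    rfl
  | append_singleton l op ih =>
    have hPre' : ∀ p ∈ l, (p.1 = "row" ∨ p.1 = "line") → (-n ≤ p.2 ∧ p.2 < n) :=
      fun p hp => hPre p (List.mem_append_left _ hp)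
    unfold simulate_ops at ih ⊢
    rw [List.foldl_append, List.foldl_cons, List.foldl_nil, ih hPre']
    unfold pvBoardOf
    rw [pvApply_mapform n hn _ op (hPre op (List.mem_append_right _ (List.mem_singleton_self op)))]
    apply pvMapform_congr
    intro i j hi0 hin hj0 hjn
    simp [pvFinal, List.foldl_append]

-- the color of an option-valued last cover
def pvColorD (o : Option (String × Int)) : Char :=
  match o with
  | none => 'W'
  | some op => pvColor op.1

-- a cover fold computes the color of the last covering op
theorem pvFinal_last (n : Int) (c : Int × Int) (l : List (String × Int)) (a : Char) :
    l.foldl (fun a op => if c ∈ pvCells n op then pvColor op.1 else a) a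
      = match (l.filter (fun op => decide (c ∈ pvCells n op))).getLast? with
        | none => a
        | some o => pvColor o.1 := by
  induction l using List.reverseRecOn with
  | nil => rfl
  | append_singleton t op ih =>
    rw [List.foldl_append, List.foldl_cons, List.foldl_nil, ih, List.filter_append]
    by_cases hc : c ∈ pvCells n op
    · simp [hc, List.getLast?_append]
    · simp [hc]

-- ---------- the covers dictionary ----------

-- proof-side view of the covers dict: the (cell, index) pairs in insertion order
def pvPairsFrom (s : Int) : List (List (Int × Int)) → List ((Int × Int) × Int)
  | [] => []
  | cs :: t => cs.map (fun c => (c, s)) ++ pvPairsFrom (s+1) t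

theorem pvCovers_flat (cls : List (List (Int × Int))) :
    ∀ (s : Int) (d : PySem.Dict (Int × Int) (List Int)),
    (PySem.List.enumerate cls s).foldl
        (fun d p => p.2.foldl (fun d c => d.modify c [] (fun l => l ++ [p.1])) d) d
      = (pvPairsFrom s cls).foldl (fun d q => d.modify q.1 [] (fun l => l ++ [q.2])) d := by
  induction cls with
  | nil => intro s d; rfl
  | cons cs t ih =>
    intro s d
    rw [PySem.List.enumerate_cons, List.foldl_cons]
    show _ = ((cs.map (fun c => (c, s)) ++ pvPairsFrom (s+1) t).foldl
      (fun d q => d.modify q.1 [] (fun l => l ++ [q.2])) d)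
    rw [List.foldl_append, List.foldl_map]
    exact ih (s+1) _

-- the occurrence list: indices (from s) of the ops covering cell c, in order
def pvOcc (n : Int) (c : Int × Int) (s : Int) : List (String × Int) → List Int
  | [] => []
  | op :: t => (if c ∈ pvCells n op then [s] else []) ++ pvOcc n c (s+1) t

-- on a Nodup list, filtering for equality with c keeps at most the one hit
theorem pvNodup_filter {α : Type} [BEq α] [LawfulBEq α] (l : List α) (hnd : l.Nodup) (c : α) :
    l.filter (fun x => x == c) = if c ∈ l then [c] else [] := by
  induction l with
  | nil => simp
  | cons x t ih =>
    rcases List.nodup_cons.mp hnd with ⟨hx, ht⟩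
    by_cases hxc : x = c
    · subst hxc
      rw [List.filter_cons_of_pos (by simp)]
      rw [if_pos (List.mem_cons_self)]
      have : t.filter (fun y => y == x) = [] := by
        rw [List.filter_eq_nil_iff]
        intro a ha hax
        exact hx (by rwa [← beq_iff_eq.mp hax])
      rw [this]
    · rw [List.filter_cons_of_neg (by simpa using hxc), ih ht]
      have hcx : ¬ c = x := fun h => hxc h.symm
      simp [List.mem_cons, hcx]

theorem pvPairs_filter (n : Int) (ops : List (String × Int)) (c : Int × Int) :
    ∀ s, ((pvPairsFrom s (ops.map (pvCells n))).filter (fun q => q.1 == c)).map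
        (fun q => q.2) = pvOcc n c s ops := by
  induction ops with
  | nil => intro s; rfl
  | cons op t ih =>
    intro s
    show (((pvCells n op).map (fun c' => (c', s)) ++ pvPairsFrom (s+1) (t.map (pvCells n))).filter
        (fun q => q.1 == c)).map (fun q => q.2) = _
    rw [List.filter_append, List.map_append, ih (s+1)]
    have hhead : (((pvCells n op).map (fun c' => (c', s))).filter (fun q => q.1 == c)).map
        (fun q => q.2) = (if c ∈ pvCells n op then [s] else []) := by
      rw [List.filter_map, List.map_map]
      simp only [Function.comp_def]
      rw [pvNodup_filter (pvCells n op) (pvCells_nodup n op) c]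
      by_cases hc : c ∈ pvCells n op <;> simp [hc]
    rw [hhead]
    rfl

theorem pvStack_eq (n : Int) (ops : List (String × Int)) (c : Int × Int) :
    (pvCovers (ops.map (pvCells n))).getD c [] = pvOcc n c 0 ops := by
  unfold pvCovers
  rw [pvCovers_flat]
  rw [PySem.Dict.getD_foldl_modify_append]
  rw [pvPairs_filter n ops c 0]
  simp

theorem pvOcc_append (n : Int) (c : Int × Int) (l1 l2 : List (String × Int)) :
    ∀ s, pvOcc n c s (l1 ++ l2) = pvOcc n c s l1 ++ pvOcc n c (s + l1.length) l2 := by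
  induction l1 with
  | nil => intro s; simp [pvOcc]
  | cons x t ih =>
    intro s
    simp only [List.cons_append, pvOcc, ih (s+1), List.append_assoc, List.length_cons]
    have : s + 1 + (t.length : Int) = s + ((t.length : Int) + 1) := by ring
    rw [this]
    push_cast
    ring_nf

theorem pvOcc_bounds (n : Int) (c : Int × Int) (l : List (String × Int)) :
    ∀ s m, m ∈ pvOcc n c s l → s ≤ m ∧ m < s + l.length := by
  induction l with
  | nil => intro s m hm; simp [pvOcc] at hm
  | cons x t ih =>
    intro s m hm
    simp only [pvOcc, List.mem_append] at hm
    rcases hm with hm | hm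
    · have hms : m = s := by
        by_cases hc : c ∈ pvCells n x
        · simpa [hc] using hm
        · simp [hc] at hm
      subst hms
      simp only [List.length_cons]
      push_cast
      omega
    · have := ih (s+1) m hm
      simp only [List.length_cons]
      push_cast
      omega

theorem pvOcc_map_getD (n : Int) (c : Int × Int) (l : List (String × Int)) :
    ∀ s, (pvOcc n c s l).map (fun m => l.getD (m - s).toNat ("", 0))
      = l.filter (fun op => decide (c ∈ pvCells n op)) := by
  induction l with
  | nil => intro s; rfl
  | cons op t ih =>
    intro s
    show ((if c ∈ pvCells n op then [s] else []) ++ pvOcc n c (s+1) t).map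
        (fun m => (op :: t).getD (m - s).toNat ("", 0)) = _
    rw [List.map_append]
    have htail : (pvOcc n c (s+1) t).map (fun m => (op :: t).getD (m - s).toNat ("", 0))
        = (pvOcc n c (s+1) t).map (fun m => t.getD (m - (s+1)).toNat ("", 0)) := by
      apply List.map_congr_left
      intro m hm
      have hb := pvOcc_bounds n c t (s+1) m hm
      have hms : (m - s).toNat = (m - (s+1)).toNat + 1 := by omega
      rw [hms, List.getD_cons_succ]
    rw [htail, ih (s+1)]
    by_cases hc : c ∈ pvCells n op
    · rw [if_pos hc, List.filter_cons_of_pos (by simpa using hc)]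
      simp
    · rw [if_neg hc, List.filter_cons_of_neg (by simpa using hc)]
      simp

theorem pvOcc_nil_iff (n : Int) (c : Int × Int) (l : List (String × Int)) (s : Int) :
    pvOcc n c s l = [] ↔ l.filter (fun op => decide (c ∈ pvCells n op)) = [] := by
  constructor
  · intro h
    have := pvOcc_map_getD n c l s
    rw [h] at this
    simpa using this.symm
  · intro h
    have := pvOcc_map_getD n c l s
    rw [h] at this
    exact List.map_eq_nil_iff.mp this

-- ---------- acceptance equivalence: A's candidate test = B's local test ----------

theorem pvFinal_eq_colorD (n : Int) (l : List (String × Int)) (c : Int × Int) :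
    pvFinal n l c
      = pvColorD ((l.filter (fun op => decide (c ∈ pvCells n op))).getLast?) := by
  unfold pvFinal pvColorD
  exact pvFinal_last n c l 'W'

-- removing op k leaves a cell it covers unchanged iff a later cover exists or the
-- previous cover (or white) already shows its color
theorem pvCell_removable (n : Int) (ops : List (String × Int)) (k : Nat) (hk : k < ops.length)
    (c : Int × Int) (hc : c ∈ pvCells n (ops[k]'hk)) :
    (pvFinal n (ops.take k ++ ops.drop (k+1)) c = pvFinal n ops c) ↔
      ((ops.drop (k+1)).filter (fun op => decide (c ∈ pvCells n op)) ≠ [] ∨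
       pvColorD (((ops.take k).filter (fun op => decide (c ∈ pvCells n op))).getLast?)
         = pvColor (ops[k]'hk).1) := by
  have hdrop : ops.drop k = ops[k]'hk :: ops.drop (k+1) := List.drop_eq_getElem_cons hk
  have hsplit : ops = ops.take k ++ ops[k]'hk :: ops.drop (k+1) := by
    conv_lhs => rw [← List.take_append_drop k ops, hdrop]
  rw [pvFinal_eq_colorD, pvFinal_eq_colorD]
  have hfops : ops.filter (fun op => decide (c ∈ pvCells n op))
      = (ops.take k).filter (fun op => decide (c ∈ pvCells n op)) ++
        (ops[k]'hk) :: (ops.drop (k+1)).filter (fun op => decide (c ∈ pvCells n op)) := by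
    conv_lhs => rw [hsplit]
    rw [List.filter_append, List.filter_cons_of_pos (by simpa using hc)]
  rw [hfops, List.filter_append]
  cases hFd : (ops.drop (k+1)).filter (fun op => decide (c ∈ pvCells n op)) with
  | nil =>
    rw [List.append_nil, List.getLast?_append]
    simp [pvColorD]
  | cons x t =>
    rw [List.getLast?_append, List.getLast?_append, List.getLast?_cons_cons]
    have hx : (x :: t).getLast? = some ((x :: t).getLast (by simp)) :=
      List.getLast?_eq_some_getLast (by simp)
    rw [hx, Option.some_or]
    simp

-- congruence for find? over a list
theorem pvFind_congr {α : Type} (p q : α → Bool) (l : List α)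
    (h : ∀ x ∈ l, p x = q x) : l.find? p = l.find? q := by
  induction l with
  | nil => rfl
  | cons a t ih =>
    by_cases ha : p a = true
    · rw [List.find?_cons_of_pos ha,
        List.find?_cons_of_pos (by rw [← h a List.mem_cons_self]; exact ha)]
    · rw [List.find?_cons_of_neg ha,
        List.find?_cons_of_neg (by rw [← h a List.mem_cons_self]; exact ha)]
      exact ih (fun x hx => h x (List.mem_cons_of_mem _ hx))

-- B's per-op test, characterized through the occurrence lists
theorem pvOk_iff (n : Int) (ops : List (String × Int)) (k : Nat) (hk : k < ops.length) :
    (pvOk ops (pvCovers (ops.map (pvCells n))) (pvCells n (ops[k]'hk)) (k : Int)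
        (pvColor (ops[k]'hk).1) = true) ↔
      ∀ c ∈ pvCells n (ops[k]'hk),
        ((ops.drop (k+1)).filter (fun op => decide (c ∈ pvCells n op)) ≠ [] ∨
         pvColorD (((ops.take k).filter (fun op => decide (c ∈ pvCells n op))).getLast?)
           = pvColor (ops[k]'hk).1) := by
  have hdrop : ops.drop k = ops[k]'hk :: ops.drop (k+1) := List.drop_eq_getElem_cons hk
  have hsplit : ops = ops.take k ++ ops[k]'hk :: ops.drop (k+1) := by
    conv_lhs => rw [← List.take_append_drop k ops, hdrop]
  have htkl : (ops.take k).length = k := by simp [List.length_take]; omega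
  unfold pvOk
  rw [List.all_eq_true]
  refine forall₂_congr ?_
  intro c hc
  show ((fun c => (let stack := (pvCovers (ops.map (pvCells n))).getD c [];
    if PySem.List.pyGetD stack (-1) (-1) = (k:Int) then
      decide ((if 1 < stack.length then
        pvColor (PySem.List.pyGetD ops (PySem.List.pyGetD stack (-2) 0) ("", 0)).1
       else 'W') = pvColor (ops[k]'hk).1)
    else true)) c = true) ↔ _
  dsimp only
  have hstack : (pvCovers (ops.map (pvCells n))).getD c []
      = pvOcc n c 0 (ops.take k) ++ (k:Int) :: pvOcc n c ((k:Int)+1) (ops.drop (k+1)) := by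
    rw [pvStack_eq]
    conv_lhs => rw [hsplit]
    rw [pvOcc_append]
    have h0k : (0 : Int) + (((ops.take k).length : Nat) : Int) = (k : Int) := by
      rw [htkl]; omega
    rw [h0k]
    show _ ++ ((if c ∈ pvCells n (ops[k]'hk) then [(k:Int)] else []) ++
        pvOcc n c ((k:Int)+1) (ops.drop (k+1))) = _
    rw [if_pos hc]
    rfl
  rw [hstack]
  cases hS : pvOcc n c ((k:Int)+1) (ops.drop (k+1)) with
  | cons m t =>
    -- a later cover exists: the stack ends past k, and the drop-filter is nonempty
    rw [hS] at hstack
    have hne : pvOcc n c 0 (ops.take k) ++ (k:Int) :: m :: t ≠ [] := by simp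
    rw [PySem.List.pyGetD_neg_one _ (-1) hne]
    have hsome : (pvOcc n c 0 (ops.take k) ++ (k:Int) :: m :: t).getLast?
        = some ((m :: t).getLast (by simp)) := by
      rw [List.getLast?_append, List.getLast?_cons_cons,
        List.getLast?_eq_some_getLast (l := m :: t) (by simp), Option.some_or]
    have hglval : (pvOcc n c 0 (ops.take k) ++ (k:Int) :: m :: t).getLast hne
        = (m :: t).getLast (by simp) := by
      have h2 := List.getLast?_eq_some_getLast hne
      rw [hsome] at h2
      exact (Option.some.inj h2).symm
    have hmem : (m :: t).getLast (by simp) ∈ pvOcc n c ((k:Int)+1) (ops.drop (k+1)) := by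
      rw [hS]; exact List.getLast_mem _
    have hbig := pvOcc_bounds n c (ops.drop (k+1)) ((k:Int)+1) _ hmem
    rw [if_neg (by rw [hglval]; omega)]
    have hFdne : (ops.drop (k+1)).filter (fun op => decide (c ∈ pvCells n op)) ≠ [] := by
      intro hnil
      rw [(pvOcc_nil_iff n c (ops.drop (k+1)) ((k:Int)+1)).mpr hnil] at hS
      simp at hS
    simp [hFdne]
  | nil =>
    have hFd := (pvOcc_nil_iff n c (ops.drop (k+1)) ((k:Int)+1)).mp hS
    have hne : pvOcc n c 0 (ops.take k) ++ [(k:Int)] ≠ [] := by simp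
    rw [PySem.List.pyGetD_neg_one _ (-1) hne]
    have hlastk : (pvOcc n c 0 (ops.take k) ++ [(k:Int)]).getLast hne = (k:Int) := by
      have h1 : (pvOcc n c 0 (ops.take k) ++ [(k:Int)]).getLast? = some (k:Int) := by
        rw [List.getLast?_append]
        rfl
      have h2 := List.getLast?_eq_some_getLast hne
      rw [h1] at h2
      exact (Option.some.inj h2).symm
    rw [if_pos hlastk, decide_eq_true_iff]
    cases hP : pvOcc n c 0 (ops.take k) with
    | nil =>
      have hFt := (pvOcc_nil_iff n c (ops.take k) 0).mp hP
      rw [if_neg (by simp)]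
      simp [hFd, hFt, pvColorD]
    | cons y yt =>
      have hPne : pvOcc n c 0 (ops.take k) ≠ [] := by rw [hP]; simp
      rw [if_pos (by simp)]
      have h2le : 2 ≤ ((y :: yt) ++ [(k:Int)]).length := by simp
      rw [PySem.List.pyGetD_neg_ofNat _ 2 0 (by omega) h2le]
      have hidx : ((y :: yt) ++ [(k:Int)]).length - 2 < (y :: yt).length := by simp
      have hgetP : ((y :: yt) ++ [(k:Int)])[((y :: yt) ++ [(k:Int)]).length - 2]'(by simp)
          = (y :: yt).getLast (by simp) := by
        rw [List.getElem_append_left hidx, List.getLast_eq_getElem]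
        congr 1
        simp
      rw [hgetP]
      set m := (y :: yt).getLast (by simp) with hm
      have hmemP : m ∈ pvOcc n c 0 (ops.take k) := by
        rw [hP]; exact List.getLast_mem (by simp)
      have hmb := pvOcc_bounds n c (ops.take k) 0 m hmemP
      rw [htkl] at hmb
      have hget : PySem.List.pyGetD ops m ("", 0) = ops[m.toNat]'(by omega) :=
        PySem.List.pyGetD_eq_getElem ops ("", 0) (by omega) (by omega)
      rw [hget]
      have hPlast : (pvOcc n c 0 (ops.take k)).getLast? = some m := by
        rw [hP]; exact List.getLast?_eq_some_getLast (by simp)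
      have hFt : ((ops.take k).filter (fun op => decide (c ∈ pvCells n op))).getLast?
          = some ((ops.take k).getD (m - 0).toNat ("", 0)) := by
        rw [← pvOcc_map_getD n c (ops.take k) 0, List.getLast?_map, hPlast]
        rfl
      have hmtk : m.toNat < (ops.take k).length := by omega
      have htkget : (ops.take k).getD (m - 0).toNat ("", 0) = ops[m.toNat]'(by omega) := by
        rw [sub_zero, List.getD_eq_getElem _ _ hmtk, List.getElem_take]
      rw [hFt, htkget]
      simp [hFd, pvColorD]

theorem pvAccept_iff (n : Int) (ops : List (String × Int))
    (hPre : ∀ p ∈ ops, (p.1 = "row" ∨ p.1 = "line") → (0 < n → (-n ≤ p.2 ∧ p.2 < n)))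
    (k : Nat) (hk : k < ops.length) :
    (boards_equal (simulate_ops (ops.eraseIdx k) n) (simulate_ops ops n) = true)
      ↔ (pvOk ops (pvCovers (ops.map (pvCells n))) ((ops.map (pvCells n)).getD k [])
          (k : Int) (pvColor (PySem.List.pyGetD ops (k : Int) ("", 0)).1) = true) := by
  have hcs : (ops.map (pvCells n)).getD k [] = pvCells n (ops[k]'hk) := by
    rw [List.getD_eq_getElem _ _ (by simpa using hk), List.getElem_map]
  have hop : PySem.List.pyGetD ops (k:Int) ("", 0) = ops[k]'hk := by
    rw [PySem.List.pyGetD_natCast, List.getD_eq_getElem _ _ hk]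
  rw [hcs, hop]
  by_cases hn : n ≤ 0
  · rw [pvSim_nonpos (ops.eraseIdx k) n hn, pvSim_nonpos ops n hn,
      pvCells_nonpos n (ops[k]'hk) hn]
    constructor <;> intro <;> rfl
  · have hn' : 0 < n := by omega
    have hPre1 : ∀ p ∈ ops, (p.1 = "row" ∨ p.1 = "line") → (-n ≤ p.2 ∧ p.2 < n) :=
      fun p hp hrl => hPre p hp hrl hn'
    have hPre2 : ∀ p ∈ ops.eraseIdx k, (p.1 = "row" ∨ p.1 = "line") → (-n ≤ p.2 ∧ p.2 < n) :=
      fun p hp hrl => hPre1 p (List.mem_of_mem_eraseIdx hp) hrl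
    rw [pvSimChar n hn' _ hPre2, pvSimChar n hn' _ hPre1]
    unfold pvBoardOf
    rw [pvBoardsEqual_iff _ _ (by rw [pvMapform_length, pvMapform_length])]
    rw [pvMapform_eq_iff, pvOk_iff n ops k hk, List.eraseIdx_eq_take_drop_succ]
    constructor
    · intro h c hc
      obtain ⟨i, j⟩ := c
      obtain ⟨hi0, hin, hj0, hjn⟩ := pvCells_in_grid n _ i j hc
      exact (pvCell_removable n ops k hk (i, j) hc).mp (h i j hi0 hin hj0 hjn)
    · intro h i j hi0 hin hj0 hjn
      by_cases hc : (i, j) ∈ pvCells n (ops[k]'hk)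
      · exact (pvCell_removable n ops k hk (i, j) hc).mpr (h _ hc)
      · rw [pvFinal_eq_colorD, pvFinal_eq_colorD]
        have hdrop : ops.drop k = ops[k]'hk :: ops.drop (k+1) := List.drop_eq_getElem_cons hk
        have hsplit : ops = ops.take k ++ ops[k]'hk :: ops.drop (k+1) := by
          conv_lhs => rw [← List.take_append_drop k ops, hdrop]
        have hfops : ops.filter (fun op => decide ((i, j) ∈ pvCells n op))
            = (ops.take k ++ ops.drop (k+1)).filter
                (fun op => decide ((i, j) ∈ pvCells n op)) := by
          conv_lhs => rw [hsplit]
          rw [List.filter_append, List.filter_cons_of_neg (by simpa using hc),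
            List.filter_append]
        rw [hfops]

-- ---------- the two loops in lockstep ----------

theorem pvLoopA_scan (n : Int) (T : List (List Char)) (ops : List (String × Int)) (i : Nat) :
    pvLoopA n T ops i
      = match ((List.range ops.length).drop i).find? (fun j =>
          boards_equal (simulate_ops (ops.eraseIdx j) n) T) with
        | some j => pvLoopA n T (ops.eraseIdx j) 0
        | none => ops := by
  rw [pvLoopA]
  by_cases h : i < ops.length
  · rw [dif_pos h]
    have hdr : (List.range ops.length).drop i = i :: (List.range ops.length).drop (i+1) := by
      rw [List.drop_eq_getElem_cons (by simpa using h), List.getElem_range]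
    have hcand : (PySem.List.slice ops none (some (i:Int)) ++
        PySem.List.slice ops (some ((i:Int)+1)) none) = ops.eraseIdx i := by
      rw [PySem.List.slice_to_natCast,
        show ((i:Int)+1) = (((i+1 : Nat)):Int) by push_cast; ring,
        PySem.List.slice_from_natCast, List.eraseIdx_eq_take_drop_succ]
    rw [hdr]
    simp only [hcand]
    by_cases hb : boards_equal (simulate_ops (ops.eraseIdx i) n) T = true
    · rw [if_pos hb, List.find?_cons_of_pos
        (p := fun j => boards_equal (simulate_ops (ops.eraseIdx j) n) T) hb]
    · rw [if_neg hb, List.find?_cons_of_neg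
        (p := fun j => boards_equal (simulate_ops (ops.eraseIdx j) n) T) hb]
      exact pvLoopA_scan n T ops (i+1)
  · rw [dif_neg h]
    rw [List.drop_eq_nil_of_le (by rw [List.length_range]; omega)]
    rfl
termination_by ops.length - i
decreasing_by omega

theorem pvLoops_eq (n : Int) (ops : List (String × Int))
    (hPre : ∀ p ∈ ops, (p.1 = "row" ∨ p.1 = "line") → (0 < n → (-n ≤ p.2 ∧ p.2 < n))) :
    pvLoopA n (simulate_ops ops n) ops 0 = pvLoopB n ops := by
  rw [pvLoopA_scan, List.drop_zero, pvLoopB]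
  have hfind : (List.range ops.length).find? (fun j =>
      boards_equal (simulate_ops (ops.eraseIdx j) n) (simulate_ops ops n))
      = pvFind ops (ops.map (pvCells n)) (pvCovers (ops.map (pvCells n))) := by
    unfold pvFind
    apply pvFind_congr
    intro j hj
    exact Bool.coe_iff_coe.mp (pvAccept_iff n ops hPre j (List.mem_range.mp hj))
  rw [hfind]
  cases hF : pvFind ops (ops.map (pvCells n)) (pvCovers (ops.map (pvCells n))) with
  | none => rfl
  | some k =>
    have hk := pvFind_lt _ _ _ _ hF
    have hacc : boards_equal (simulate_ops (ops.eraseIdx k) n) (simulate_ops ops n) = true := by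
      have := List.find?_some (p := fun j =>
        boards_equal (simulate_ops (ops.eraseIdx j) n) (simulate_ops ops n))
        (by rw [hfind]; exact hF)
      exact this
    have hsimeq : simulate_ops (ops.eraseIdx k) n = simulate_ops ops n := by
      by_cases hn : n ≤ 0
      · rw [pvSim_nonpos _ _ hn, pvSim_nonpos _ _ hn]
      · have hn' : 0 < n := by omega
        have hPre1 : ∀ p ∈ ops, (p.1 = "row" ∨ p.1 = "line") → (-n ≤ p.2 ∧ p.2 < n) :=
          fun p hp hrl => hPre p hp hrl hn'
        have hPre2 : ∀ p ∈ ops.eraseIdx k, (p.1 = "row" ∨ p.1 = "line") →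
            (-n ≤ p.2 ∧ p.2 < n) :=
          fun p hp hrl => hPre1 p (List.mem_of_mem_eraseIdx hp) hrl
        rw [pvSimChar n hn' _ hPre2, pvSimChar n hn' _ hPre1] at hacc ⊢
        exact (pvBoardsEqual_iff _ _ (by
          unfold pvBoardOf
          rw [pvMapform_length, pvMapform_length])).mp hacc
    have hPreE : ∀ p ∈ ops.eraseIdx k, (p.1 = "row" ∨ p.1 = "line") →
        (0 < n → (-n ≤ p.2 ∧ p.2 < n)) :=
      fun p hp hrl hn => hPre p (List.mem_of_mem_eraseIdx hp) hrl hn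
    calc pvLoopA n (simulate_ops ops n) (ops.eraseIdx k) 0
        = pvLoopA n (simulate_ops (ops.eraseIdx k) n) (ops.eraseIdx k) 0 := by rw [hsimeq]
      _ = pvLoopB n (ops.eraseIdx k) := pvLoops_eq n (ops.eraseIdx k) hPreE
termination_by ops.length
decreasing_by
  rw [List.length_eraseIdx]
  simp only [if_pos hk]
  omega

-- ===== VERDICT (by name: the statement is the Claim_ definition above) =====
theorem optimize_ops_spec : Claim_equal_optimize_ops := by
  intro ops n _ hPre
  unfold Spec_optimize_ops optimize_ops optimize_ops_alt
  exact pvLoops_eq n ops (fun p hp hrl hn => hPre hn p hp hrl)
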